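-- pv_equiv track=rewrite | github.com/tensorrent/tent-io | tent_io/harness/tools/summarize_intelligence_regression_trend.py | consecutive_alarms
-- ===== SOURCE A (Python) =====
-- from typing import Any
--
-- def row_status(row: dict[str, Any]) -> str:
--     status = row.get("status")
--     if isinstance(status, str) and status:
--         return status
--     return "unknown"
--
-- def consecutive_alarms(rows: list[dict[str, Any]]) -> int:
--     count = 0
--     for row in reversed(rows):
--         if row_status(row) == "alarm":
--             count += 1
--             continue
--         break
--     return count
-- ===== SOURCE B (Python) =====
-- from typing import Any
--
-- def row_status(row: dict[str, Any]) -> str: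
--     status = row.get("status")
--     if isinstance(status, str) and status:
--         return status
--     return "unknown"
--
-- def consecutive_alarms(rows: list[dict[str, Any]]) -> int:
--     count = 0
--     for row in rows:
--         count = count + 1 if row_status(row) == "alarm" else 0
--     return count
-- ===== Notes on version B (the rewrite author's own statement) =====
-- stated objective: alternative
-- what changed: Replaces the backward scan with early break by a forward full scan with a counter that resets to 0 on any non-alarm row, so the value left after the loop is the length of the trailing alarm run.
import Mathlib
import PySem

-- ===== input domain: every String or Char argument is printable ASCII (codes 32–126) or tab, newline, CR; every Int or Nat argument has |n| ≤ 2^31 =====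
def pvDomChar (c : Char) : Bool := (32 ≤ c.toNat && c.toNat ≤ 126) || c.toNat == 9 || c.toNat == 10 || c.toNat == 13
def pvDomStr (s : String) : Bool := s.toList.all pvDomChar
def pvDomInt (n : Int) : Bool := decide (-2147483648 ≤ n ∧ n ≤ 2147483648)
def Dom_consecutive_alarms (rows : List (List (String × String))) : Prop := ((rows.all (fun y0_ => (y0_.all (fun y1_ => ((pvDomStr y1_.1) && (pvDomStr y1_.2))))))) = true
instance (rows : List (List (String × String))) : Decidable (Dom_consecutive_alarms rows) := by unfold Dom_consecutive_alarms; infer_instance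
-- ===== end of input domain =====

-- B replaces A's backward scan with early break by a forward scan with a reset-to-zero counter (alternative decomposition, same cost class).


-- ===== PORT A =====
-- shared helper: Python row_status (values are always strings here, so the isinstance test reduces to non-emptiness)
def row_status (row : List (String × String)) : String :=
  match (PySem.Dict.mk row).get? "status" with
  | some s => if s ≠ "" then s else "unknown"
  | none => "unknown"

-- A: walk reversed(rows), incrementing until the first non-alarm row (break)
def consecutiveAlarmsGo : List (List (String × String)) → Int
  | [] => 0
  | r :: rest => if row_status r == "alarm" then consecutiveAlarmsGo rest + 1 else 0

def consecutive_alarms (rows : List (List (String × String))) : Int :=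
  consecutiveAlarmsGo rows.reverse

-- ===== PORT B =====
-- B: forward fold; counter += 1 on an alarm row, reset to 0 otherwise
def consecutive_alarms_alt (rows : List (List (String × String))) : Int :=
  rows.foldl (fun count row => if row_status row == "alarm" then count + 1 else 0) 0

-- ===== PRECONDITION & SPEC =====
def Spec_consecutive_alarms (rows : List (List (String × String))) (out : Int) : Prop := out = consecutive_alarms_alt rows
instance (rows : List (List (String × String))) (out : Int) : Decidable (Spec_consecutive_alarms rows out) := by unfold Spec_consecutive_alarms; infer_instance

-- ===== CLAIM (what is proved, stated in full; the proofs are below) =====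
def Claim_equal_consecutive_alarms : Prop := ∀ (rows : List (List (String × String))), Dom_consecutive_alarms rows → Spec_consecutive_alarms rows (consecutive_alarms rows)

-- ===== LEMMAS AND PROOFS =====
-- The reset-counter fold over l++[r] is: +1 of the fold over l when r is an alarm, else 0 —
-- exactly the backward recursion's step on the reversed list.
theorem foldB_snoc (l : List (List (String × String))) (r : List (String × String)) (c : Int) :
    (l ++ [r]).foldl (fun count row => if row_status row == "alarm" then count + 1 else 0) c
    = if row_status r == "alarm"
      then l.foldl (fun count row => if row_status row == "alarm" then count + 1 else 0) c + 1
      else 0 := by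
  simp [List.foldl_append]

theorem goA_eq_foldB (rows : List (List (String × String))) :
    consecutiveAlarmsGo rows.reverse
    = rows.foldl (fun count row => if row_status row == "alarm" then count + 1 else 0) 0 := by
  induction rows using List.reverseRecOn with
  | nil => simp [consecutiveAlarmsGo]
  | append_singleton l r ih =>
    rw [foldB_snoc, List.reverse_append]
    simp only [List.reverse_singleton, List.singleton_append, consecutiveAlarmsGo, ih]

-- ===== VERDICT (by name: the statement is the Claim_ definition above) =====
theorem consecutive_alarms_spec : Claim_equal_consecutive_alarms := by
  intro rows _
  unfold Spec_consecutive_alarms consecutive_alarms consecutive_alarms_alt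
  exact goA_eq_foldB rows
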